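-- pv_equiv track=rewrite | github.com/agarwalmaanvik/NEXUS | range_encoder.py | hand_to_class
-- ===== SOURCE A (Python) =====
-- def hand_to_class(card1: int, card2: int) -> int:
--     """Convert two card integers (0-51) to a class index (0-168).
--     Engine encoding: card = rank*4 + suit  →  rank = card//4, suit = card%4.
--     """
--     r1, r2 = int(card1) // 4, int(card2) // 4
--     s1, s2 = int(card1) % 4,  int(card2) % 4
--     if r1 < r2:
--         r1, r2 = r2, r1
--         s1, s2 = s2, s1
--     suited = (s1 == s2)
--
--     if r1 == r2:  # Pair
--         return 12 - r1
--
--     if suited:    # Suited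
--         # Count combos before this pair
--         offset = 13
--         for hi in range(12, r1, -1):
--             offset += hi
--         offset += (r1 - 1 - r2)
--         return offset
--
--     else:         # Offsuit
--         offset = 91
--         for hi in range(12, r1, -1):
--             offset += hi
--         offset += (r1 - 1 - r2)
--         return offset
-- ===== SOURCE B (Python) =====
-- def hand_to_class(card1: int, card2: int) -> int:
--     r1, s1 = divmod(card1, 4)
--     r2, s2 = divmod(card2, 4)
--     if r1 < r2:
--         r1, r2, s1, s2 = r2, r1, s2, s1
--     if r1 == r2:          # Pair
--         return 12 - r1
--     # combos whose high rank is above r1: triangular closed form (0 if none)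
--     tri = (12 - r1) * (13 + r1) // 2 if r1 < 12 else 0
--     base = 13 if s1 == s2 else 91
--     return base + tri + (r1 - 1 - r2)
-- ===== Notes on version B (the rewrite author's own statement) =====
-- stated objective: simpler
-- what changed: The per-rank accumulation loop `for hi in range(12, r1, -1): offset += hi` is replaced by its closed-form triangular sum (12-r1)*(13+r1)//2, so the whole offset is one arithmetic expression with no loop.
import Mathlib
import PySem

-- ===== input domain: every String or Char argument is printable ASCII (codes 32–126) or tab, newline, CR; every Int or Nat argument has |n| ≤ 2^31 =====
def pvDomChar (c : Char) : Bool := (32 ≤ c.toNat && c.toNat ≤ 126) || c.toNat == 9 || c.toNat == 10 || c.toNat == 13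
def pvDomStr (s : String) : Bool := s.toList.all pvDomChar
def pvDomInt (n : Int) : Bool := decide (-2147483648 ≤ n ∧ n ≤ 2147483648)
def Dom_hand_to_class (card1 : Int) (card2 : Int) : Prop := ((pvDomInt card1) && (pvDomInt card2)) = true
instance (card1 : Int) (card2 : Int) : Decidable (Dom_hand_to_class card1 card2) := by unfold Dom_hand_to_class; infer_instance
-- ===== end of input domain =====

-- B replaces A's rank-accumulation loop by its closed-form triangular sum: simpler, loop-free offset.

-- ===== PORT A =====
def hand_to_class (card1 : Int) (card2 : Int) : Int :=
  let r1 := PySem.Int.floordiv card1 4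
  let r2 := PySem.Int.floordiv card2 4
  let s1 := PySem.Int.mod card1 4
  let s2 := PySem.Int.mod card2 4
  let p := if r1 < r2 then (r2, r1, s2, s1) else (r1, r2, s1, s2)
  let r1 := p.1
  let r2 := p.2.1
  let s1 := p.2.2.1
  let s2 := p.2.2.2
  let suited := s1 == s2
  if r1 == r2 then
    12 - r1
  else if suited then
    let offset := (PySem.List.pyRange 12 r1 (-1)).foldl (fun acc hi => acc + hi) 13
    offset + (r1 - 1 - r2)
  else
    let offset := (PySem.List.pyRange 12 r1 (-1)).foldl (fun acc hi => acc + hi) 91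
    offset + (r1 - 1 - r2)

-- ===== PORT B =====
def hand_to_class_alt (card1 : Int) (card2 : Int) : Int :=
  let r1 := PySem.Int.floordiv card1 4
  let s1 := PySem.Int.mod card1 4
  let r2 := PySem.Int.floordiv card2 4
  let s2 := PySem.Int.mod card2 4
  let p := if r1 < r2 then (r2, r1, s2, s1) else (r1, r2, s1, s2)
  let r1 := p.1
  let r2 := p.2.1
  let s1 := p.2.2.1
  let s2 := p.2.2.2
  if r1 == r2 then
    12 - r1
  else
    let tri := if r1 < 12 then PySem.Int.floordiv ((12 - r1) * (13 + r1)) 2 else 0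
    let base : Int := if s1 == s2 then 13 else 91
    base + tri + (r1 - 1 - r2)

-- ===== PRECONDITION & SPEC =====
def Spec_hand_to_class (card1 : Int) (card2 : Int) (out : Int) : Prop := out = hand_to_class_alt card1 card2
instance (card1 : Int) (card2 : Int) (out : Int) : Decidable (Spec_hand_to_class card1 card2 out) := by unfold Spec_hand_to_class; infer_instance

-- ===== CLAIM (what is proved, stated in full; the proofs are below) =====
def Claim_equal_hand_to_class : Prop := ∀ (card1 : Int) (card2 : Int), Dom_hand_to_class card1 card2 → Spec_hand_to_class card1 card2 (hand_to_class card1 card2)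

-- ===== LEMMAS AND PROOFS =====

-- The countdown accumulation equals its closed-form triangular value.
theorem pv_tri_fold : ∀ (n : Nat) (a c r : Int), (a - r).toNat = n →
    (PySem.List.pyRange a r (-1)).foldl (fun acc hi => acc + hi) c
      = c + (if r < a then PySem.Int.floordiv ((a - r) * (a + 1 + r)) 2 else 0)
  | 0, a, c, r, h => by
      rw [PySem.List.pyRange_neg_one_eq_nil (by omega)]
      rw [if_neg (by omega)]
      simp
  | n+1, a, c, r, h => by
      rw [PySem.List.pyRange_neg_one_cons (by omega : r < a)]
      simp only [List.foldl_cons]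
      rw [pv_tri_fold n (a - 1) (c + a) r (by omega)]
      rw [if_pos (by omega : r < a)]
      by_cases hr : r < a - 1
      · rw [if_pos hr]
        rw [PySem.Int.floordiv_eq_ediv_of_pos (by norm_num),
            PySem.Int.floordiv_eq_ediv_of_pos (by norm_num)]
        have hX : (a - 1 - r) * (a - 1 + 1 + r) = (a - r) * (a + 1 + r) - 2 * a := by ring
        rw [hX]
        generalize (a - r) * (a + 1 + r) = X
        omega
      · rw [if_neg hr]
        have hX : (a - r) * (a + 1 + r) = 2 * a := by
          have hre : r = a - 1 := by omega
          rw [hre]; ring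
        rw [hX, PySem.Int.floordiv_eq_ediv_of_pos (by norm_num)]
        omega

-- A-shaped branch body equals B-shaped branch body, for any post-swap ranks/suits.
theorem pv_core (r1 r2 s1 s2 : Int) :
    (if r1 == r2 then 12 - r1
     else if s1 == s2 then
       ((PySem.List.pyRange 12 r1 (-1)).foldl (fun acc hi => acc + hi) 13) + (r1 - 1 - r2)
     else
       ((PySem.List.pyRange 12 r1 (-1)).foldl (fun acc hi => acc + hi) 91) + (r1 - 1 - r2))
    = (if r1 == r2 then 12 - r1
       else ((if s1 == s2 then (13 : Int) else 91)
              + (if r1 < 12 then PySem.Int.floordiv ((12 - r1) * (13 + r1)) 2 else 0))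
            + (r1 - 1 - r2)) := by
  by_cases hpq : r1 == r2
  · rw [if_pos hpq, if_pos hpq]
  · rw [if_neg hpq, if_neg hpq]
    by_cases hst : s1 == s2 <;>
      [rw [if_pos hst, if_pos hst]; rw [if_neg hst, if_neg hst]] <;>
    · rw [pv_tri_fold (12 - r1).toNat 12 _ r1 rfl]
      have h13 : (12 : Int) + 1 + r1 = 13 + r1 := by ring
      rw [h13]

-- ===== VERDICT (by name: the statement is the Claim_ definition above) =====
theorem hand_to_class_spec : Claim_equal_hand_to_class := by
  intro card1 card2 _
  unfold Spec_hand_to_class hand_to_class hand_to_class_alt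
  dsimp only
  by_cases hsw : PySem.Int.floordiv card1 4 < PySem.Int.floordiv card2 4 <;>
    · dsimp only
      exact pv_core _ _ _ _
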